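-- pv_equiv track=rewrite | github.com/SSCT-Lab/PyFPattern | Data Set/bug-fixing-5/c396ad974299e03fd166975ab51b5868e8fb92a6-<construct_doc2author>-fix.py | construct_doc2author
-- ===== SOURCE A (Python) =====
-- def construct_doc2author(corpus, author2doc):
--     'Create a mapping from document IDs to author IDs.\n\n    Parameters\n    ----------\n    corpus: iterable of list of (int, float)\n        Corpus in BoW format.\n    author2doc: dict of (str, list of int)\n        Mapping of authors to documents.\n\n    Returns\n    -------\n    dict of (int, list of str)\n        Document to Author mapping.\n\n    '
--     doc2author = {
--
--     }
--     for (d, _) in enumerate(corpus):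
--         author_ids = []
--         for (a, a_doc_ids) in author2doc.items():
--             if (d in a_doc_ids):
--                 author_ids.append(a)
--         doc2author[d] = author_ids
--     return doc2author
-- ===== SOURCE B (Python) =====
-- def construct_doc2author(corpus, author2doc):
--     n = len(corpus)
--     doc2author = {d: [] for d in range(n)}
--     for a, a_doc_ids in author2doc.items():
--         for d in dict.fromkeys(a_doc_ids):
--             if 0 <= d < n:
--                 doc2author[d].append(a)
--     return doc2author
-- ===== Notes on version B (the rewrite author's own statement) =====
-- stated objective: faster
-- what changed: Instead of scanning every author's document list for every document (D nested membership scans), B preinitializes one empty list per document and makes a single pass over the author->doc entries, appending each author to its (deduplicated, in-range) documents' lists.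
import Mathlib
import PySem

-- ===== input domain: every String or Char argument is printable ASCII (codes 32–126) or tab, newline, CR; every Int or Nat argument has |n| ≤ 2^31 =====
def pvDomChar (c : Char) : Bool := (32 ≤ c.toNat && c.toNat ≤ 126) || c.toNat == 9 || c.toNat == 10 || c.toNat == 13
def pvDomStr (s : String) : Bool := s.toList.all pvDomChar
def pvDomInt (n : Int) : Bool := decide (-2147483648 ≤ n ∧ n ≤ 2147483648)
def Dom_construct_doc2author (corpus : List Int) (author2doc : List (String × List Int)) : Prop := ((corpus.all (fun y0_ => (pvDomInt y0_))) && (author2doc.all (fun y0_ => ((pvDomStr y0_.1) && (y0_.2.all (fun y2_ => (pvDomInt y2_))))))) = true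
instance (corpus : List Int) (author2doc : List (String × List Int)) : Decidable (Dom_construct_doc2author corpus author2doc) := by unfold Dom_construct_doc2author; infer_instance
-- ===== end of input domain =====

-- B inverts the mapping in one pass over the author→doc entries (appending into
-- preinitialized per-document lists) instead of scanning every author's doc list
-- for every document; faster on inputs where each author has few documents.

-- ===== PORT A =====
-- for (d, _) in enumerate(corpus): build author_ids by scanning author2doc; doc2author[d] = author_ids
def construct_doc2author (corpus : List Int) (author2doc : List (String × List Int)) : List (Int × List String) :=
  ((PySem.List.enumerate corpus).foldl
    (fun d2a p =>
      let author_ids : List String :=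
        author2doc.foldl (fun acc q => if p.1 ∈ q.2 then acc ++ [q.1] else acc) []
      d2a.insert p.1 author_ids)
    PySem.Dict.empty).items

-- ===== PORT B =====
-- doc2author = {d: [] for d in range(n)}; for each author, append it to the list of
-- each of its (deduplicated, in-range) documents
def construct_doc2author_alt (corpus : List Int) (author2doc : List (String × List Int)) : List (Int × List String) :=
  (author2doc.foldl
    (fun d2a q =>
      (PySem.List.dedup q.2).foldl
        (fun d2a d =>
          if 0 ≤ d ∧ d < (corpus.length : Int) then d2a.modify d [] (fun l => l ++ [q.1]) else d2a)
        d2a)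
    ((PySem.List.pyRange 0 (corpus.length : Int)).foldl
      (fun d2a d => d2a.insert d ([] : List String)) PySem.Dict.empty)).items

-- ===== PRECONDITION & SPEC =====
def Spec_construct_doc2author (corpus : List Int) (author2doc : List (String × List Int)) (out : List (Int × List String)) : Prop := out = construct_doc2author_alt corpus author2doc
instance (corpus : List Int) (author2doc : List (String × List Int)) (out : List (Int × List String)) : Decidable (Spec_construct_doc2author corpus author2doc out) := by unfold Spec_construct_doc2author; infer_instance

-- ===== CLAIM (what is proved, stated in full; the proofs are below) =====
def Claim_equal_construct_doc2author : Prop := ∀ (corpus : List Int) (author2doc : List (String × List Int)), Dom_construct_doc2author corpus author2doc → Spec_construct_doc2author corpus author2doc (construct_doc2author corpus author2doc)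

-- ===== LEMMAS AND PROOFS =====

-- the inner loop of B, folding one author's (deduplicated) doc list into the dict
def pvInner (n : Int) (a : String) (S : List Int) (d2a : PySem.Dict Int (List String)) :
    PySem.Dict Int (List String) :=
  S.foldl (fun d2a d => if 0 ≤ d ∧ d < n then d2a.modify d [] (fun l => l ++ [a]) else d2a) d2a

lemma pvInner_keys (n : Int) (a : String) (S : List Int) (d2a : PySem.Dict Int (List String))
    (h : d2a.keys = PySem.List.pyRange 0 n) :
    (pvInner n a S d2a).keys = PySem.List.pyRange 0 n := by
  induction S generalizing d2a with
  | nil => simpa [pvInner] using h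
  | cons d rest ih =>
    simp only [pvInner, List.foldl_cons]
    by_cases hd : 0 ≤ d ∧ d < n
    · have hk : (d2a.modify d [] (fun l => l ++ [a])).keys = d2a.keys := by
        rw [PySem.Dict.keys_modify, PySem.Dict.keys_insert_of_contains]
        rw [PySem.Dict.contains_eq_decide_mem_keys, h]
        simp [PySem.List.mem_pyRange_one, hd.1, hd.2]
      rw [if_pos hd]
      exact ih _ (hk.trans h)
    · rw [if_neg hd]
      exact ih _ h

lemma pvInner_getD (n : Int) (a : String) (S : List Int) (hS : S.Nodup)
    (d2a : PySem.Dict Int (List String)) (c : Int) :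
    (pvInner n a S d2a).getD c [] =
      if c ∈ S ∧ 0 ≤ c ∧ c < n then d2a.getD c [] ++ [a] else d2a.getD c [] := by
  induction S generalizing d2a with
  | nil => simp [pvInner]
  | cons d rest ih =>
    have hnd : d ∉ rest := (List.nodup_cons.mp hS).1
    simp only [pvInner, List.foldl_cons]
    rw [show (List.foldl (fun d2a d => if 0 ≤ d ∧ d < n then d2a.modify d [] (fun l => l ++ [a]) else d2a)
        (if 0 ≤ d ∧ d < n then d2a.modify d [] (fun l => l ++ [a]) else d2a) rest)
      = pvInner n a rest (if 0 ≤ d ∧ d < n then d2a.modify d [] (fun l => l ++ [a]) else d2a) from rfl]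
    rw [ih (List.nodup_cons.mp hS).2]
    by_cases hcd : c = d
    · subst hcd
      simp only [List.mem_cons, true_or, true_and, hnd, false_and, if_false]
      by_cases hd : 0 ≤ c ∧ c < n
      · simp [hd, PySem.Dict.getD_modify_self]
      · simp [hd]
    · have hmem : (c ∈ d :: rest) ↔ c ∈ rest := by simp [List.mem_cons, hcd]
      by_cases hd : 0 ≤ d ∧ d < n
      · have hmod : (d2a.modify d [] (fun l => l ++ [a])).getD c [] = d2a.getD c [] := by
          rw [PySem.Dict.getD_modify]
          simp [hcd]
        rw [if_pos hd, hmod]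
        simp [hmem]
      · rw [if_neg hd]
        simp [hmem]

-- value of B's accumulated dict at key c, for c in range
lemma pvOuter_getD (n : Int) (L : List (String × List Int))
    (d2a : PySem.Dict Int (List String)) (c : Int) (hc : 0 ≤ c ∧ c < n) :
    (L.foldl (fun d2a q => pvInner n q.1 (PySem.List.dedup q.2) d2a) d2a).getD c [] =
      d2a.getD c [] ++ (L.filter (fun q => decide (c ∈ q.2))).map (·.1) := by
  induction L generalizing d2a with
  | nil => simp
  | cons q rest ih =>
    simp only [List.foldl_cons, ih, List.filter_cons]
    rw [pvInner_getD n q.1 _ (by simp)]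
    by_cases hq : c ∈ q.2
    · simp [hq, hc.1, hc.2]
    · simp [hq]

lemma pvOuter_keys (n : Int) (L : List (String × List Int))
    (d2a : PySem.Dict Int (List String)) (h : d2a.keys = PySem.List.pyRange 0 n) :
    (L.foldl (fun d2a q => pvInner n q.1 (PySem.List.dedup q.2) d2a) d2a).keys
      = PySem.List.pyRange 0 n := by
  induction L generalizing d2a with
  | nil => simpa using h
  | cons q rest ih => exact ih _ (pvInner_keys n q.1 _ d2a h)

lemma pvInit_items (n : Int) :
    ((PySem.List.pyRange 0 n).foldl (fun d2a d => d2a.insert d ([] : List String))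
        PySem.Dict.empty).items
      = (PySem.List.pyRange 0 n).map (fun d => (d, ([] : List String))) := by
  simpa using PySem.Dict.items_foldl_insert_fresh (PySem.List.pyRange 0 n) id
    (fun _ => ([] : List String)) PySem.Dict.empty (by simp)
    (by simpa using PySem.List.nodup_pyRange_one 0 n)

-- A's port as a map over the document indices
lemma pvA_eq_map (corpus : List Int) (author2doc : List (String × List Int)) :
    construct_doc2author corpus author2doc
      = (PySem.List.pyRange 0 (corpus.length : Int)).map
          (fun d => (d, (author2doc.filter (fun q => decide (d ∈ q.2))).map (·.1))) := by
  unfold construct_doc2author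
  rw [PySem.Dict.items_foldl_insert_fresh (PySem.List.enumerate corpus) (·.1)
    (fun p => author2doc.foldl (fun acc q => if p.1 ∈ q.2 then acc ++ [q.1] else acc) [])
    PySem.Dict.empty (by simp)
    (by rw [show (List.map (fun p => p.1) (PySem.List.enumerate corpus))
              = (PySem.List.enumerate corpus).map (·.1) from rfl,
            PySem.List.map_fst_enumerate]
        simpa using PySem.List.nodup_pyRange_one 0 corpus.length)]
  have h1 : ∀ (p : Int × Int),
      author2doc.foldl (fun acc q => if p.1 ∈ q.2 then acc ++ [q.1] else acc) ([] : List String)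
        = (author2doc.filter (fun q => decide (p.1 ∈ q.2))).map (·.1) := by
    intro p
    simpa using PySem.List.foldl_append_if (fun q : String × List Int => decide (p.1 ∈ q.2))
      (fun q => q.1) author2doc []
  calc (PySem.Dict.empty : PySem.Dict Int (List String)).items
        ++ (PySem.List.enumerate corpus).map
            (fun p => (p.1, author2doc.foldl (fun acc q => if p.1 ∈ q.2 then acc ++ [q.1] else acc) []))
      = ((PySem.List.enumerate corpus).map (·.1)).map
            (fun d => (d, (author2doc.filter (fun q => decide (d ∈ q.2))).map (·.1))) := by
        simp only [PySem.Dict.empty, List.nil_append, List.map_map]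
        exact List.map_congr_left (fun p _ => by simp only [Function.comp, h1 p])
    _ = _ := by rw [PySem.List.map_fst_enumerate, zero_add]

-- ===== VERDICT (by name: the statement is the Claim_ definition above) =====
theorem construct_doc2author_spec : Claim_equal_construct_doc2author := by
  intro corpus author2doc _
  unfold Spec_construct_doc2author construct_doc2author_alt
  rw [pvA_eq_map]
  have hinit_keys :
      ((PySem.List.pyRange 0 (corpus.length : Int)).foldl
          (fun d2a d => d2a.insert d ([] : List String)) PySem.Dict.empty).keys
        = PySem.List.pyRange 0 (corpus.length : Int) := by
    rw [show (((PySem.List.pyRange 0 (corpus.length : Int)).foldl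
        (fun d2a d => d2a.insert d ([] : List String)) PySem.Dict.empty).keys)
      = (((PySem.List.pyRange 0 (corpus.length : Int)).foldl
        (fun d2a d => d2a.insert d ([] : List String)) PySem.Dict.empty).items).map (·.1) from rfl,
      pvInit_items]
    simp [Function.comp_def]
  rw [show (author2doc.foldl
      (fun d2a q => (PySem.List.dedup q.2).foldl
        (fun d2a d => if 0 ≤ d ∧ d < (corpus.length : Int) then d2a.modify d [] (fun l => l ++ [q.1]) else d2a) d2a)
      ((PySem.List.pyRange 0 (corpus.length : Int)).foldl
        (fun d2a d => d2a.insert d ([] : List String)) PySem.Dict.empty))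
    = author2doc.foldl (fun d2a q => pvInner (corpus.length : Int) q.1 (PySem.List.dedup q.2) d2a)
      ((PySem.List.pyRange 0 (corpus.length : Int)).foldl
        (fun d2a d => d2a.insert d ([] : List String)) PySem.Dict.empty)
    from rfl]
  have hkeys := pvOuter_keys (corpus.length : Int) author2doc _ hinit_keys
  rw [PySem.Dict.items_eq_map_keys _
    (by rw [hkeys]; exact PySem.List.nodup_pyRange_one 0 (corpus.length : Int)) ([] : List String)]
  rw [hkeys]
  apply List.map_congr_left
  intro d hd
  have hdr : 0 ≤ d ∧ d < (corpus.length : Int) := PySem.List.mem_pyRange_one.mp hd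
  rw [pvOuter_getD (corpus.length : Int) author2doc _ d hdr]
  have hinit : (((PySem.List.pyRange 0 (corpus.length : Int)).foldl
      (fun d2a d => d2a.insert d ([] : List String)) PySem.Dict.empty)).getD d [] = [] := by
    apply PySem.Dict.getD_of_mem_items (v := ([] : List String))
    · rw [pvInit_items]
      exact List.mem_map.mpr ⟨d, hd, rfl⟩
    · rw [hinit_keys]
      exact PySem.List.nodup_pyRange_one 0 (corpus.length : Int)
  rw [hinit]
  simp
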